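-- pv_equiv track=rewrite | github.com/DanielDuda260802/Slozene_zavrsni | Najkraci_putevi/1.rok_23_24.py | edges_from_input
-- ===== SOURCE A (Python) =====
-- def edges_from_input(matrix):
--     edges = {}
--     for i,row in enumerate(matrix):
--         edge_key = (row[0], row[1])
--         if edge_key not in edges:
--             edges[edge_key] = row[2]
--         else:
--             if edges[edge_key] > row[2]:
--                 edges[edge_key] = row[2]
--     return edges
-- ===== SOURCE B (Python) =====
-- def edges_from_input(matrix):
--     groups = {}
--     for row in matrix:
--         groups.setdefault((row[0], row[1]), []).append(row[2])
--     return {key: min(ws) for key, ws in groups.items()}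
-- ===== Notes on version B (the rewrite author's own statement) =====
-- stated objective: alternative
-- what changed: A keeps a running minimum per edge key in one loop; B first groups all weights per key into lists (setdefault/append) and then reduces each list with min in a separate dict-comprehension pass.
import Mathlib
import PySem

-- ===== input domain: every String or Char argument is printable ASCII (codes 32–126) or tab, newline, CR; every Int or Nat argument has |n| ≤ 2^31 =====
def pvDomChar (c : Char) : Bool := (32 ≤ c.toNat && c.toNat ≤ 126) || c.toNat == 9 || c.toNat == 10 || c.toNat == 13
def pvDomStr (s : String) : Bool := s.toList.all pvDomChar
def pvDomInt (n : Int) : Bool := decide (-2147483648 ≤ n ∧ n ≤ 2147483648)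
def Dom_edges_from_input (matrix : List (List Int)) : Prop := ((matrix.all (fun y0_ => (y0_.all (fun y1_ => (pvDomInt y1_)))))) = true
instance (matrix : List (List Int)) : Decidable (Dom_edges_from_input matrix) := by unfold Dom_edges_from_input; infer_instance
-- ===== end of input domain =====

-- B groups all weights per edge key into lists first and takes min per key in a second pass,
-- instead of A's single loop keeping a running minimum; same result, same cost (objective: alternative).


-- ===== PORT A =====
def edges_from_input (matrix : List (List Int)) : List (Int × Int × Int) :=
  let edges : PySem.Dict (Int × Int) Int :=
    (PySem.List.enumerate matrix 0).foldl (fun edges ir =>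
      let row := ir.2
      let edge_key := (PySem.List.pyGetD row 0 0, PySem.List.pyGetD row 1 0)
      if edges.contains edge_key = false then
        edges.insert edge_key (PySem.List.pyGetD row 2 0)
      else if edges.getD edge_key 0 > PySem.List.pyGetD row 2 0 then
        edges.insert edge_key (PySem.List.pyGetD row 2 0)
      else edges) PySem.Dict.empty
  edges.items.map (fun p => (p.1.1, p.1.2, p.2))

-- ===== PORT B =====
-- min(ws) for a nonempty list of ints (PySem.List.min? is Python's min; default never used under Pre_)
def mnInt (ws : List Int) : Int := (PySem.List.min? ws (fun y => y)).getD 0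

def edges_from_input_alt (matrix : List (List Int)) : List (Int × Int × Int) :=
  let groups : PySem.Dict (Int × Int) (List Int) :=
    matrix.foldl (fun g row =>
      g.modify (PySem.List.pyGetD row 0 0, PySem.List.pyGetD row 1 0) []
        (fun ws => ws ++ [PySem.List.pyGetD row 2 0])) PySem.Dict.empty
  groups.items.map (fun p => (p.1.1, p.1.2, mnInt p.2))

-- ===== PRECONDITION & SPEC =====
-- Pre_ excludes exactly the inputs on which Python A raises IndexError (a row with fewer than 3 entries).
def Pre_edges_from_input (matrix : List (List Int)) : Prop :=
  ∀ row ∈ matrix, 3 ≤ row.length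
instance (matrix : List (List Int)) : Decidable (Pre_edges_from_input matrix) := by
  unfold Pre_edges_from_input; infer_instance

def pvWitness_edges_from_input : List (List Int) := [[1, 2, 5], [1, 2, 3], [2, 3, 7]]

def Spec_edges_from_input (matrix : List (List Int)) (out : List (Int × Int × Int)) : Prop := out = edges_from_input_alt matrix
instance (matrix : List (List Int)) (out : List (Int × Int × Int)) : Decidable (Spec_edges_from_input matrix out) := by unfold Spec_edges_from_input; infer_instance

-- ===== CLAIM (what is proved, stated in full; the proofs are below) =====
def Claim_equal_edges_from_input : Prop := ∀ (matrix : List (List Int)), Dom_edges_from_input matrix → Pre_edges_from_input matrix → Spec_edges_from_input matrix (edges_from_input matrix)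

-- ===== LEMMAS AND PROOFS =====

-- A's per-row update (the loop body of port A)
def stepA (edges : PySem.Dict (Int × Int) Int) (row : List Int) : PySem.Dict (Int × Int) Int :=
  let edge_key := (PySem.List.pyGetD row 0 0, PySem.List.pyGetD row 1 0)
  if edges.contains edge_key = false then
    edges.insert edge_key (PySem.List.pyGetD row 2 0)
  else if edges.getD edge_key 0 > PySem.List.pyGetD row 2 0 then
    edges.insert edge_key (PySem.List.pyGetD row 2 0)
  else edges

-- B's per-row update (the loop body of port B)
def stepB (g : PySem.Dict (Int × Int) (List Int)) (row : List Int) : PySem.Dict (Int × Int) (List Int) :=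
  g.modify (PySem.List.pyGetD row 0 0, PySem.List.pyGetD row 1 0) []
    (fun ws => ws ++ [PySem.List.pyGetD row 2 0])

-- reduce one group entry to A's running-min entry
def fmin (p : (Int × Int) × List Int) : (Int × Int) × Int := (p.1, mnInt p.2)

-- the dict A maintains, computed from the dict B maintains
def mkmap (g : PySem.Dict (Int × Int) (List Int)) : PySem.Dict (Int × Int) Int :=
  PySem.Dict.mk (g.items.map fmin)

lemma foldl_enumerate {α β : Type} (xs : List α) (s : Int) (h : β → α → β) (init : β) :
    (PySem.List.enumerate xs s).foldl (fun a p => h a p.2) init = xs.foldl h init := by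
  induction xs generalizing s init with
  | nil => rfl
  | cons x t ih => simp [PySem.List.enumerate_cons, List.foldl_cons, ih]

lemma mnInt_append_singleton (ws : List Int) (hws : ws ≠ []) (w : Int) :
    mnInt (ws ++ [w]) = if w < mnInt ws then w else mnInt ws := by
  obtain ⟨x, t, rfl⟩ := List.exists_cons_of_ne_nil hws
  unfold mnInt
  rw [List.cons_append, PySem.List.min?_id_cons, PySem.List.min?_id_cons, List.foldl_append]
  simp [min_def]; omega

lemma keys_mkmap (g : PySem.Dict (Int × Int) (List Int)) : (mkmap g).keys = g.keys := by
  simp [mkmap, PySem.Dict.keys, fmin, Function.comp]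

lemma contains_mkmap (g : PySem.Dict (Int × Int) (List Int)) (k : Int × Int) :
    (mkmap g).contains k = g.contains k := by
  simp [mkmap, PySem.Dict.contains, List.any_map, Function.comp_def, fmin]

lemma item_unique {ν : Type} (g : PySem.Dict (Int × Int) ν) (hnd : g.keys.Nodup)
    {k : Int × Int} {v : ν} (hv : (k, v) ∈ g.items) {p : (Int × Int) × ν}
    (hp : p ∈ g.items) (hk : p.1 = k) : p = (k, v) := by
  have := (PySem.Dict.get?_eq_some_iff_mem_items g k v hnd).mpr hv
  have hp' : g.get? p.1 = some p.2 := by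
    rcases p with ⟨a, b⟩
    exact (PySem.Dict.get?_eq_some_iff_mem_items g a b hnd).mpr hp
  rw [hk, this] at hp'
  rcases p with ⟨a, b⟩
  simp only [Option.some.injEq] at hp'
  simp [Prod.ext_iff] at hk ⊢
  exact ⟨hk, hp'.symm⟩

lemma stepB_nodup (g : PySem.Dict (Int × Int) (List Int)) (row : List Int)
    (hnd : g.keys.Nodup) : (stepB g row).keys.Nodup := by
  unfold stepB PySem.Dict.modify
  exact PySem.Dict.nodup_keys_insert _ _ _ hnd

lemma stepB_nonempty (g : PySem.Dict (Int × Int) (List Int)) (row : List Int)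
    (hne : ∀ p ∈ g.items, p.2 ≠ []) : ∀ p ∈ (stepB g row).items, p.2 ≠ [] := by
  intro p hp
  unfold stepB PySem.Dict.modify at hp
  rcases (PySem.Dict.mem_items_insert _ _ _ _).mp hp with h | ⟨h, _⟩
  · subst h; simp
  · exact hne p h

lemma step_comm (g : PySem.Dict (Int × Int) (List Int)) (row : List Int)
    (hnd : g.keys.Nodup) (hne : ∀ p ∈ g.items, p.2 ≠ []) :
    stepA (mkmap g) row = mkmap (stepB g row) := by
  unfold stepA stepB PySem.Dict.modify
  simp only [contains_mkmap]
  set k : Int × Int := (PySem.List.pyGetD row 0 0, PySem.List.pyGetD row 1 0) with hkdef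
  set w : Int := PySem.List.pyGetD row 2 0 with hwdef
  by_cases hc : g.contains k = true
  · -- key present
    obtain ⟨ws, hg⟩ : ∃ ws, g.get? k = some ws := by
      have := PySem.Dict.contains_eq_isSome_get? (d := g) (k := k)
      rw [hc] at this
      exact Option.isSome_iff_exists.mp this.symm
    have hmem : (k, ws) ∈ g.items := PySem.Dict.mem_items_of_get?_eq_some g hg
    have hwsne : ws ≠ [] := hne _ hmem
    have hgetg : g.getD k [] = ws := PySem.Dict.getD_of_get?_eq_some g [] hg
    have hndm : (mkmap g).keys.Nodup := by rw [keys_mkmap]; exact hnd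
    have hmemm : (k, mnInt ws) ∈ (mkmap g).items :=
      List.mem_map.mpr ⟨(k, ws), hmem, rfl⟩
    have hget_map : (mkmap g).getD k 0 = mnInt ws :=
      PySem.Dict.getD_of_mem_items (mkmap g) hmemm hndm 0
    rw [hc, hgetg, hget_map]
    have hins : (g.insert k (ws ++ [w])).items
        = g.items.map (fun p => if p.1 == k then (k, ws ++ [w]) else p) :=
      PySem.Dict.items_insert_of_contains g _ hc
    by_cases hlt : w < mnInt ws
    · rw [if_neg (by simp), if_pos (by omega)]
      apply PySem.Dict.ext
      rw [PySem.Dict.items_insert_of_contains _ _ (by rw [contains_mkmap]; exact hc)]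
      show ((mkmap g).items).map _ = ((g.insert k (ws ++ [w])).items).map fmin
      rw [hins, mkmap, PySem.Dict.items, List.map_map, List.map_map]
      apply List.map_congr_left
      intro p hp
      by_cases hpk : p.1 = k
      · simp [Function.comp_def, fmin, hpk, mnInt_append_singleton ws hwsne w, hlt]
      · simp [Function.comp_def, fmin, hpk]
    · rw [if_neg (by simp), if_neg (by omega)]
      apply PySem.Dict.ext
      show ((g.items).map fmin) = ((g.insert k (ws ++ [w])).items).map fmin
      rw [hins, List.map_map]
      apply List.map_congr_left
      intro p hp
      by_cases hpk : p.1 = k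
      · have hpe : p = (k, ws) := item_unique g hnd hmem hp hpk
        subst hpe
        simp [Function.comp_def, fmin, mnInt_append_singleton ws hwsne w, hlt]
      · simp [Function.comp_def, fmin, hpk]
  · -- new key
    have hc' : g.contains k = false := by simpa using hc
    rw [hc']
    simp only [if_true, eq_self_iff_true]
    have hgetg : g.getD k [] = [] := PySem.Dict.getD_of_not_contains g [] hc'
    apply PySem.Dict.ext
    rw [PySem.Dict.items_insert_of_not_contains _ _ (by rw [contains_mkmap]; exact hc')]
    show (mkmap g).items ++ [(k, w)] = ((g.insert k (g.getD k [] ++ [w])).items).map fmin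
    rw [hgetg, List.nil_append, PySem.Dict.items_insert_of_not_contains _ _ hc', List.map_append]
    rfl

lemma fold_comm (matrix : List (List Int)) (g : PySem.Dict (Int × Int) (List Int))
    (hnd : g.keys.Nodup) (hne : ∀ p ∈ g.items, p.2 ≠ []) :
    matrix.foldl stepA (mkmap g) = mkmap (matrix.foldl stepB g) := by
  induction matrix generalizing g with
  | nil => rfl
  | cons row t ih =>
      simp only [List.foldl_cons, step_comm g row hnd hne]
      exact ih _ (stepB_nodup g row hnd) (stepB_nonempty g row hne)

-- ===== VERDICT (by name: the statement is the Claim_ definition above) =====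
theorem edges_from_input_spec : Claim_equal_edges_from_input := by
  intro matrix _ _
  unfold Spec_edges_from_input edges_from_input edges_from_input_alt
  have he : (PySem.List.enumerate matrix 0).foldl
      (fun edges ir =>
        let row := ir.2
        let edge_key := (PySem.List.pyGetD row 0 0, PySem.List.pyGetD row 1 0)
        if edges.contains edge_key = false then
          edges.insert edge_key (PySem.List.pyGetD row 2 0)
        else if edges.getD edge_key 0 > PySem.List.pyGetD row 2 0 then
          edges.insert edge_key (PySem.List.pyGetD row 2 0)
        else edges) PySem.Dict.empty
      = matrix.foldl stepA PySem.Dict.empty :=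
    foldl_enumerate matrix 0 stepA PySem.Dict.empty
  have hb : (matrix.foldl (fun g row =>
      g.modify (PySem.List.pyGetD row 0 0, PySem.List.pyGetD row 1 0) []
        (fun ws => ws ++ [PySem.List.pyGetD row 2 0])) PySem.Dict.empty)
      = matrix.foldl stepB PySem.Dict.empty := rfl
  have hmk : mkmap (PySem.Dict.empty) = PySem.Dict.empty := rfl
  have := fold_comm matrix PySem.Dict.empty (by simp [PySem.Dict.keys, PySem.Dict.empty])
    (by simp [PySem.Dict.empty])
  rw [hmk] at this
  simp only [he, hb, this, mkmap, List.map_map]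
  rfl
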